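-- pv_equiv track=rewrite | github.com/Illusionna/Codes | Python/Siamese/packages/siameseScheme.py | GetImageOutputLength
-- ===== SOURCE A (Python) =====
-- def GetImageOutputLength(width, height):
--     def GetImageOutputLength(inputLength):
--         # inputLength = inputLength + 6
--         filterSizes = [2, 2, 2, 2, 2]
--         padding = [0, 0, 0, 0, 0]
--         stride = 2
--         for i in range(0, 5, 1):
--             inputLength = (inputLength + 2*padding[i] - filterSizes[i]) // stride + 1
--         return inputLength
--     return GetImageOutputLength(width) * GetImageOutputLength(height)
-- ===== SOURCE B (Python) =====
-- def GetImageOutputLength(width, height):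
--     # closed form: each conv step maps x to x // 2, five steps give x // 32
--     return (width // 32) * (height // 32)
-- ===== Notes on version B (the rewrite author's own statement) =====
-- stated objective: simpler
-- what changed: Replaced the 5-iteration loop helper (which applies x -> (x + 0 - 2)//2 + 1 = x//2 five times) with the closed form (width // 32) * (height // 32).
import Mathlib
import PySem

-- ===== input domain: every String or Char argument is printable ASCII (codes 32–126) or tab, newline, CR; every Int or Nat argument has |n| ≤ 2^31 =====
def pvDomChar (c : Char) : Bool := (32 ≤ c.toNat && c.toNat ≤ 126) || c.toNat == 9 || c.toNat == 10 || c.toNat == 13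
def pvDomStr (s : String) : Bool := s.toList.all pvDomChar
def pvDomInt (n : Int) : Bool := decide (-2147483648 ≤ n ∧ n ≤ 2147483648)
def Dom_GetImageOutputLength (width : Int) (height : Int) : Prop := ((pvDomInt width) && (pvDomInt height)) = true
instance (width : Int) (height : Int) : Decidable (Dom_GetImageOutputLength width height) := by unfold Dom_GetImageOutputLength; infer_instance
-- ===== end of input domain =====

-- ===== PORT A =====
-- inner helper: the 5-iteration loop of A, transliterated (list indexing via pyGetD, '//' via floordiv)
def GetImageOutputLength_inner (inputLength : Int) : Int :=
  let filterSizes : List Int := [2, 2, 2, 2, 2]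
  let padding : List Int := [0, 0, 0, 0, 0]
  let stride : Int := 2
  (PySem.List.pyRange 0 5 1).foldl
    (fun x i => PySem.Int.floordiv (x + 2 * (PySem.List.pyGetD padding i 0) - (PySem.List.pyGetD filterSizes i 0)) stride + 1)
    inputLength

def GetImageOutputLength (width : Int) (height : Int) : Int :=
  GetImageOutputLength_inner width * GetImageOutputLength_inner height

-- ===== PORT B =====
def GetImageOutputLength_alt (width : Int) (height : Int) : Int :=
  PySem.Int.floordiv width 32 * PySem.Int.floordiv height 32

-- ===== PRECONDITION & SPEC =====
def Spec_GetImageOutputLength (width : Int) (height : Int) (out : Int) : Prop := out = GetImageOutputLength_alt width height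
instance (width : Int) (height : Int) (out : Int) : Decidable (Spec_GetImageOutputLength width height out) := by unfold Spec_GetImageOutputLength; infer_instance

-- ===== CLAIM (what is proved, stated in full; the proofs are below) =====
def Claim_equal_GetImageOutputLength : Prop := ∀ (width : Int) (height : Int), Dom_GetImageOutputLength width height → Spec_GetImageOutputLength width height (GetImageOutputLength width height)

-- ===== LEMMAS AND PROOFS =====

lemma inner_eq (x : Int) : GetImageOutputLength_inner x = PySem.Int.floordiv x 32 := by
  simp [GetImageOutputLength_inner, PySem.List.pyRange, PySem.List.pyGetD, PySem.List.pyGet?,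
        PySem.List.pyIdx?, PySem.Int.floordiv, Int.fdiv_eq_ediv, List.range_succ]
  omega

-- ===== VERDICT (by name: the statement is the Claim_ definition above) =====
theorem GetImageOutputLength_spec : Claim_equal_GetImageOutputLength := by
  intro w h _
  unfold Spec_GetImageOutputLength GetImageOutputLength GetImageOutputLength_alt
  rw [inner_eq, inner_eq]
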